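-- pv_equiv track=rewrite | github.com/polsbca/Technical-Challenge | src/template_matrix_loader.py | normalize_scope_name
-- ===== SOURCE A (Python) =====
-- def normalize_scope_name(name: str) -> str:
--     """
--     Normalize scope name for use as SQL column name.
--
--     Examples:
--         "User Identification" -> "user_identification"
--         "Legal & Security Purposes" -> "legal_and_security_purposes"
--         "Customization/Personalization" -> "customization_personalization"
--
--     Args:
--         name: Raw scope name from template
--
--     Returns:
--         Normalized column-safe name
--     """
--     if not name or not isinstance(name, str):
--         return ""
--
--     normalized = (
--         name.lower()           # Lowercase
--         .strip()               # Remove whitespace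
--         .replace("&", "and")   # Replace & with "and"
--         .replace("/", "_")     # Replace / with underscore
--         .replace("-", "_")     # Replace - with underscore
--         .replace(" ", "_")     # Replace spaces with underscore
--         .replace("(", "")      # Remove parentheses
--         .replace(")", "")
--         .replace(",", "")      # Remove commas
--     )
--
--     # Remove consecutive underscores
--     while "__" in normalized:
--         normalized = normalized.replace("__", "_")
--
--     # Remove leading/trailing underscores
--     normalized = normalized.strip("_")
--
--     return normalized
-- ===== SOURCE B (Python) =====
-- def normalize_scope_name(name: str) -> str:
--     """Single-pass normalization: one scan over the lowered/stripped string,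
--     collapsing separator runs on the fly instead of chained replaces + a loop."""
--     if not name or not isinstance(name, str):
--         return ""
--     out = []
--     for ch in name.lower().strip():
--         if ch == '&':
--             out.append('a'); out.append('n'); out.append('d')
--         elif ch in "/- _":
--             if out and out[-1] != '_':
--                 out.append('_')
--         elif ch in "(),":
--             pass
--         else:
--             out.append(ch)
--     if out and out[-1] == '_':
--         out.pop()
--     return ''.join(out)
-- ===== Notes on version B (the rewrite author's own statement) =====
-- stated objective: alternative
-- what changed: Replaces A's six chained str.replace passes, the `while '__'` collapse loop and the final strip('_') by one stateful scan that expands '&', collapses separator runs and drops '(),' on the fly.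
import Mathlib
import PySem

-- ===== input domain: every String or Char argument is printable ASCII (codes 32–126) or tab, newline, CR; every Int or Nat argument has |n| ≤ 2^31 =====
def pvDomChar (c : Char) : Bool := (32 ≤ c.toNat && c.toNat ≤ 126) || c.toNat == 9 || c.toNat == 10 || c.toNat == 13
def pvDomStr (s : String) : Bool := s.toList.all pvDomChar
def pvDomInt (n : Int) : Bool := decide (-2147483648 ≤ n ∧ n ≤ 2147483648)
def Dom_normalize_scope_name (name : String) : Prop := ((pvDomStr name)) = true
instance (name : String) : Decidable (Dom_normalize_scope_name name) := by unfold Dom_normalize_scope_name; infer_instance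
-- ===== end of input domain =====

-- B replaces A's six chained `replace` calls, the `while "__"` collapse loop and the final
-- strip("_") by ONE stateful pass over the lowered/stripped characters; same return value
-- on every input (proved below), different decomposition.

-- ===== PORT A =====
-- `pvStep` is one pass of Python's `normalized.replace("__", "_")` (all non-overlapping
-- occurrences, left to right); it and the lemmas up to `pvStep_length_lt` are needed above
-- the port only to justify termination of the `while "__"` loop (`pvCollapse`).
def pvStep : List Char → List Char
  | [] => []
  | [c] => [c]
  | a :: b :: t => if a = '_' ∧ b = '_' then '_' :: pvStep t else a :: pvStep (b :: t)
termination_by s => s.length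
decreasing_by all_goals (simp; try omega)

theorem go_dd : ∀ (fuel : Nat) (l acc : List Char), l.length ≤ fuel →
    PySem.Chars.replace.go ['_', '_'] ['_'] fuel l acc = acc.reverse ++ pvStep l := by
  intro fuel
  induction fuel with
  | zero =>
    intro l acc h
    have : l = [] := List.length_eq_zero_iff.mp (Nat.le_zero.mp h)
    simp [PySem.Chars.replace.go, this, pvStep]
  | succ n ih =>
    intro l acc h
    match l with
    | [] => simp [PySem.Chars.replace.go, pvStep]
    | [a] =>
      simp only [PySem.Chars.replace.go, List.isPrefixOf, List.isPrefixOf_nil_left, Bool.and_true]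
      rw [if_neg (by simp)]
      rw [ih _ _ (by simp)]
      simp [pvStep]
    | a :: b :: t =>
      simp only [PySem.Chars.replace.go, List.isPrefixOf, List.isPrefixOf_nil_left, Bool.and_true]
      by_cases hab : a = '_' ∧ b = '_'
      · obtain ⟨ha, hb⟩ := hab; subst ha; subst hb
        rw [if_pos (by simp)]
        rw [ih _ _ (by simp at h ⊢; omega)]
        simp [pvStep]
      · rw [if_neg (by simp; intro h1 h2; exact hab ⟨h1.symm, h2.symm⟩)]
        rw [ih _ _ (by simp at h ⊢; omega)]
        rw [pvStep]
        rw [if_neg hab]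
        simp


theorem pvStep_eq_replace (s : List Char) :
    PySem.Chars.replace s ['_', '_'] ['_'] = pvStep s := by
  rw [PySem.Chars.replace]
  simp only [List.isEmpty_cons, if_false, Bool.false_eq_true]
  rw [go_dd s.length s [] le_rfl]
  simp

theorem pvStep_length_le (s : List Char) : (pvStep s).length ≤ s.length := by
  fun_induction pvStep s <;> simp_all <;> omega

theorem pvStep_length_lt (s : List Char)
    (h : PySem.Chars.isIn ['_', '_'] s = true) : (pvStep s).length < s.length := by
  rw [PySem.Chars.isIn_iff_infix] at h
  fun_induction pvStep s with
  | case1 => simp at h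
  | case2 c => have := h.length_le; simp at this
  | case3 a b t hab ih =>
    have := pvStep_length_le t; simp; omega
  | case4 a b t hab ih =>
    have hbt : ['_', '_'] <:+: b :: t := by
      rcases List.infix_cons_iff.mp h with hp | hi
      · rcases hp with ⟨u, hu⟩
        cases hu
        exact absurd ⟨rfl, rfl⟩ hab
      · exact hi
    have := ih hbt
    simp at this ⊢; omega

-- `while "__" in normalized: normalized = normalized.replace("__", "_")`
def pvCollapse (s : List Char) : List Char :=
  if PySem.Chars.isIn ['_', '_'] s = true then
    pvCollapse (PySem.Chars.replace s ['_', '_'] ['_'])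
  else s
termination_by s.length
decreasing_by rw [pvStep_eq_replace]; exact pvStep_length_lt _ (by assumption)

def normalize_scope_name (name : String) : String :=
  if name = "" then "" else
    let normalized :=
      PySem.Chars.replace (PySem.Chars.replace (PySem.Chars.replace (PySem.Chars.replace
        (PySem.Chars.replace (PySem.Chars.replace (PySem.Chars.replace
          (PySem.Chars.strip (PySem.Chars.lower name.toList))
          ['&'] ['a', 'n', 'd'])
          ['/'] ['_'])
          ['-'] ['_'])
          [' '] ['_'])
          ['('] [])
          [')'] [])
          [','] []
    let collapsed := pvCollapse normalized
    String.ofList (PySem.Chars.stripChars collapsed ['_'])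

-- ===== PORT B =====
-- the single pass of Source B; `out` is kept reversed (Python's append = cons here, out[-1] = head)
def pvAltGo : List Char → List Char → List Char
  | [], out => out
  | c :: t, out =>
    if c = '&' then pvAltGo t ('d' :: 'n' :: 'a' :: out)
    else if c = '/' ∨ c = '-' ∨ c = ' ' ∨ c = '_' then
      if out ≠ [] ∧ out.head? ≠ some '_' then pvAltGo t ('_' :: out) else pvAltGo t out
    else if c = '(' ∨ c = ')' ∨ c = ',' then pvAltGo t out
    else pvAltGo t (c :: out)

def normalize_scope_name_alt (name : String) : String :=
  if name = "" then "" else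
    let out := pvAltGo (PySem.Chars.strip (PySem.Chars.lower name.toList)) []
    let out := if out.head? = some '_' then out.tail else out
    String.ofList out.reverse

-- ===== PRECONDITION & SPEC =====
def Spec_normalize_scope_name (name : String) (out : String) : Prop := out = normalize_scope_name_alt name
instance (name : String) (out : String) : Decidable (Spec_normalize_scope_name name out) := by unfold Spec_normalize_scope_name; infer_instance

-- ===== CLAIM (what is proved, stated in full; the proofs are below) =====
def Claim_equal_normalize_scope_name : Prop := ∀ (name : String), Dom_normalize_scope_name name → Spec_normalize_scope_name name (normalize_scope_name name)

-- ===== LEMMAS AND PROOFS =====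

-- the per-character expansion performed by A's chain of single-character replaces
def pvG (c : Char) : List Char :=
  if c = '&' then ['a', 'n', 'd']
  else if c = '/' ∨ c = '-' ∨ c = ' ' then ['_']
  else if c = '(' ∨ c = ')' ∨ c = ',' then []
  else [c]

-- "__ occurs somewhere" as a boolean scan
def pvHasDD : List Char → Bool
  | a :: b :: t => (a = '_' ∧ b = '_') || pvHasDD (b :: t)
  | _ => false
termination_by s => s.length
decreasing_by all_goals (simp; try omega)

-- collapse every run of '_' to a single '_' (the fixpoint of A's while loop)
def pvSqueeze : List Char → List Char
  | [] => []
  | [c] => [c]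
  | a :: b :: t => if a = '_' ∧ b = '_' then pvSqueeze (b :: t) else a :: pvSqueeze (b :: t)
termination_by s => s.length
decreasing_by all_goals (simp; try omega)

-- drop one leading underscore
def pvDropU (y : List Char) : List Char := if y.head? = some '_' then y.tail else y

-- A's final strip("_")
def pvTrimU (s : List Char) : List Char := PySem.Chars.stripChars s ['_']

theorem pvHasDD_iff (s : List Char) : ['_', '_'] <:+: s ↔ pvHasDD s = true := by
  fun_induction pvHasDD s with
  | case1 a b t ih =>
    rw [List.infix_cons_iff]
    simp only [Bool.or_eq_true, decide_eq_true_eq, ← ih]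
    constructor
    · rintro (hp | hi)
      · rcases hp with ⟨u, hu⟩; cases hu; exact Or.inl ⟨rfl, rfl⟩
      · exact Or.inr hi
    · rintro (⟨ha, hb⟩ | hi)
      · subst ha; subst hb; exact Or.inl ⟨t, rfl⟩
      · exact Or.inr hi
  | case2 x h =>
    simp only [Bool.false_eq_true, iff_false]
    intro hc
    have := hc.length_le
    match x, h with
    | [], _ => simp at this
    | [c], _ => simp at this
    | a :: b :: t, h => exact absurd rfl (by exact h a b t)

theorem pvDropU_cons_u (z : List Char) : pvDropU ('_' :: z) = z := by simp [pvDropU]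

theorem pvSqueeze_cons_ne (c : Char) (h : c ≠ '_') (x : List Char) :
    pvSqueeze (c :: x) = c :: pvSqueeze x := by
  cases x with
  | nil => simp [pvSqueeze]
  | cons b t => rw [pvSqueeze]; rw [if_neg (by rintro ⟨h1, _⟩; exact h h1)]

theorem pvSqueeze_cc (a b : Char) (t : List Char) :
    pvSqueeze (a :: b :: t) = if a = '_' ∧ b = '_' then pvSqueeze (b :: t) else a :: pvSqueeze (b :: t) := by
  rw [pvSqueeze]

theorem pvSqueeze_cons_u (x : List Char) :
    pvSqueeze ('_' :: x) = '_' :: pvDropU (pvSqueeze x) := by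
  fun_induction pvSqueeze x with
  | case1 => simp [pvSqueeze, pvDropU]
  | case2 c =>
    by_cases hc : c = '_'
    · subst hc; simp [pvSqueeze, pvDropU]
    · rw [pvSqueeze, if_neg (by rintro ⟨_, h1⟩; exact hc h1)]
      simp [pvSqueeze, pvDropU, hc]
  | case3 a b t hab ih =>
    obtain ⟨ha, hb⟩ := hab; subst ha; subst hb
    have e1 : pvSqueeze ('_' :: '_' :: '_' :: t) = pvSqueeze ('_' :: '_' :: t) := by
      rw [pvSqueeze, if_pos ⟨rfl, rfl⟩]
    have e2 : pvSqueeze ('_' :: '_' :: t) = pvSqueeze ('_' :: t) := by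
      rw [pvSqueeze, if_pos ⟨rfl, rfl⟩]
    rw [e1, ih]
  | case4 a b t hab ih =>
    by_cases ha : a = '_'
    · subst ha
      have e1 : pvSqueeze ('_' :: '_' :: b :: t) = pvSqueeze ('_' :: b :: t) := by
        rw [pvSqueeze, if_pos ⟨rfl, rfl⟩]
      rw [e1, ih, pvDropU_cons_u]
      have hb : b ≠ '_' := fun h => hab ⟨rfl, h⟩
      rw [pvSqueeze_cons_ne b hb]
      simp [pvDropU, hb]
    · have e1 : pvSqueeze ('_' :: a :: b :: t) = '_' :: pvSqueeze (a :: b :: t) := by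
        rw [pvSqueeze, if_neg (by rintro ⟨_, h1⟩; exact ha h1)]
      have e2 : pvSqueeze (a :: b :: t) = a :: pvSqueeze (b :: t) := by
        rw [pvSqueeze, if_neg hab]
      rw [e1, e2]
      simp [pvDropU, ha]

theorem pvSqueeze_of_noDD (s : List Char) (h : pvHasDD s = false) : pvSqueeze s = s := by
  fun_induction pvSqueeze s with
  | case1 => rfl
  | case2 c => simp [pvSqueeze]
  | case3 a b t hab ih =>
    rw [pvHasDD] at h; simp [hab] at h
  | case4 a b t hab ih =>
    rw [pvHasDD] at h
    simp only [Bool.or_eq_false_iff] at h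
    rw [ih h.2]

theorem pvSqueeze_step (s : List Char) : pvSqueeze (pvStep s) = pvSqueeze s := by
  fun_induction pvStep s with
  | case1 => rfl
  | case2 c => simp [pvStep]
  | case3 a b t hab ih =>
    obtain ⟨ha, hb⟩ := hab; subst ha; subst hb
    rw [pvSqueeze_cons_u, ih]
    have e2 : pvSqueeze ('_' :: '_' :: t) = pvSqueeze ('_' :: t) := by
      rw [pvSqueeze, if_pos ⟨rfl, rfl⟩]
    rw [pvSqueeze_cc, if_pos ⟨rfl, rfl⟩, pvSqueeze_cons_u]
  | case4 a b t hab ih =>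
    by_cases ha : a = '_'
    · subst ha
      rw [pvSqueeze_cons_u, ih, pvSqueeze_cons_u]
    · rw [pvSqueeze_cons_ne a ha, ih, pvSqueeze_cons_ne a ha]

theorem pvSqueeze_append_uu (w e : List Char) :
    pvSqueeze (w ++ '_' :: '_' :: e) = pvSqueeze (w ++ '_' :: e) := by
  induction w with
  | nil =>
    simp only [List.nil_append]
    rw [pvSqueeze, if_pos ⟨rfl, rfl⟩]
  | cons c w ih =>
    by_cases hc : c = '_'
    · subst hc
      simp only [List.cons_append]
      rw [pvSqueeze_cons_u, pvSqueeze_cons_u, ih]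
    · simp only [List.cons_append]
      rw [pvSqueeze_cons_ne c hc, pvSqueeze_cons_ne c hc, ih]

theorem go_single (c : Char) (new : List Char) :
    ∀ (fuel : Nat) (l acc : List Char), l.length ≤ fuel →
      PySem.Chars.replace.go [c] new fuel l acc
        = acc.reverse ++ l.flatMap (fun x => if x = c then new else [x]) := by
  intro fuel
  induction fuel with
  | zero =>
    intro l acc h
    have : l = [] := List.length_eq_zero_iff.mp (Nat.le_zero.mp h)
    simp [PySem.Chars.replace.go, this]
  | succ n ih =>
    intro l acc h
    cases l with
    | nil => simp [PySem.Chars.replace.go]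
    | cons a t =>
      simp only [PySem.Chars.replace.go, List.isPrefixOf, List.isPrefixOf_nil_left, Bool.and_true]
      by_cases hac : c = a
      · subst hac
        simp only [BEq.rfl, if_pos]
        rw [ih _ _ (by simpa using Nat.le_of_succ_le_succ h)]
        simp
      · rw [if_neg (by simpa using hac)]
        rw [ih _ _ (by simpa using Nat.le_of_succ_le_succ h)]
        have hne : a ≠ c := fun hh => hac hh.symm
        simp [hne]

theorem pvReplace_single (c : Char) (new : List Char) (s : List Char) :
    PySem.Chars.replace s [c] new = s.flatMap (fun x => if x = c then new else [x]) := by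
  rw [PySem.Chars.replace]
  simp only [List.isEmpty_cons, if_false, Bool.false_eq_true]
  rw [go_single c new s.length s [] le_rfl]
  simp

theorem pvTrimU_cons_u (x : List Char) : pvTrimU ('_' :: x) = pvTrimU x := by
  simp [pvTrimU, PySem.Chars.stripChars, List.dropWhile]

theorem pvTrimU_dropU (y : List Char) : pvTrimU (pvDropU y) = pvTrimU y := by
  match y with
  | [] => rfl
  | c :: t =>
    by_cases hc : c = '_'
    · subst hc; rw [pvDropU_cons_u, pvTrimU_cons_u]
    · simp [pvDropU, hc]

theorem pvTrimU_squeeze_cons_u (e : List Char) :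
    pvTrimU (pvSqueeze ('_' :: e)) = pvTrimU (pvSqueeze e) := by
  rw [pvSqueeze_cons_u, pvTrimU_cons_u, pvTrimU_dropU]

theorem pvChain_eq (u : List Char) :
    PySem.Chars.replace (PySem.Chars.replace (PySem.Chars.replace (PySem.Chars.replace
      (PySem.Chars.replace (PySem.Chars.replace (PySem.Chars.replace u
        ['&'] ['a', 'n', 'd']) ['/'] ['_']) ['-'] ['_']) [' '] ['_'])
        ['('] []) [')'] []) [','] [] = u.flatMap pvG := by
  rw [pvReplace_single, pvReplace_single, pvReplace_single, pvReplace_single,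
      pvReplace_single, pvReplace_single, pvReplace_single]
  simp only [List.flatMap_assoc]
  congr 1
  funext c
  simp only [pvG]
  split_ifs with h1 h2 h3 <;> simp_all <;> aesop

theorem pvHasDD_cons_ne (c : Char) (h : c ≠ '_') (r : List Char) :
    pvHasDD (c :: r) = pvHasDD r := by
  cases r with
  | nil => simp [pvHasDD]
  | cons b t => rw [pvHasDD]; simp [h]

theorem pvHasDD_cons_u (r : List Char) (h : r.head? ≠ some '_') :
    pvHasDD ('_' :: r) = pvHasDD r := by
  cases r with
  | nil => simp [pvHasDD]
  | cons b t =>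
    rw [pvHasDD]
    simp only [List.head?_cons, ne_eq, Option.some.injEq] at h
    simp [h]

theorem pvHasDD_reverse (s : List Char) : pvHasDD s.reverse = pvHasDD s := by
  have key : ∀ x : List Char, (['_', '_'] <:+: x.reverse) ↔ (['_', '_'] <:+: x) := by
    intro x
    constructor
    · intro h
      have := List.reverse_infix.mpr h
      simpa using this
    · intro h
      have : (['_', '_'] : List Char) = (['_', '_'] : List Char).reverse := by decide
      rw [this]
      exact List.reverse_infix.mpr h
  by_cases h : pvHasDD s = true
  · rw [h, ← pvHasDD_iff, key, pvHasDD_iff, h]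
  · have h' : pvHasDD s = false := by simpa using h
    rw [h']
    by_contra hh
    have : pvHasDD s.reverse = true := by simpa using hh
    rw [← pvHasDD_iff, key, pvHasDD_iff, h'] at this
    simp at this

theorem pvDropWhile_of_head_ne (s : List Char) (h : s.head? ≠ some '_') :
    List.dropWhile (fun c => (['_'] : List Char).contains c) s = s := by
  cases s with
  | nil => rfl
  | cons c t =>
    simp only [List.head?_cons, ne_eq, Option.some.injEq] at h
    simp [List.dropWhile, h]

theorem pvDropWhile_eq_dropU (r : List Char) (h : pvHasDD r = false) :
    List.dropWhile (fun c => (['_'] : List Char).contains c) r = pvDropU r := by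
  cases r with
  | nil => rfl
  | cons c t =>
    by_cases hc : c = '_'
    · subst hc
      have ht : t.head? ≠ some '_' := by
        cases t with
        | nil => simp
        | cons b u =>
          rw [pvHasDD] at h
          simp only [Bool.or_eq_false_iff, decide_eq_false_iff_not] at h
          simp only [List.head?_cons, ne_eq, Option.some.injEq]
          intro hb; exact h.1 (by simp [hb])
      simp only [List.dropWhile, pvDropU_cons_u]
      rw [show ((['_'] : List Char).contains '_') = true from by decide]
      simpa using pvDropWhile_of_head_ne t ht
    · have hcc : (['_'] : List Char).contains c = false := by simp; exact hc
      simp [List.dropWhile, hcc, pvDropU, hc]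

theorem pvTrimU_of_inv (r : List Char) (hdd : pvHasDD r = false)
    (hl : r.getLast? ≠ some '_') : pvTrimU r.reverse = (pvDropU r).reverse := by
  show (List.dropWhile (fun c => (['_'] : List Char).contains c)
      ((List.dropWhile (fun c => (['_'] : List Char).contains c) r.reverse).reverse)).reverse
    = (pvDropU r).reverse
  rw [pvDropWhile_of_head_ne r.reverse (by rwa [List.head?_reverse])]
  rw [List.reverse_reverse, pvDropWhile_eq_dropU r hdd]

theorem pvAltGo_spec (t : List Char) : ∀ (r : List Char),
    pvHasDD r = false → r.getLast? ≠ some '_' →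
    (pvDropU (pvAltGo t r)).reverse = pvTrimU (pvSqueeze (r.reverse ++ t.flatMap pvG)) := by
  induction t with
  | nil =>
    intro r hdd hl
    simp only [pvAltGo, List.flatMap_nil, List.append_nil]
    rw [pvSqueeze_of_noDD _ (by rw [pvHasDD_reverse]; exact hdd)]
    exact (pvTrimU_of_inv r hdd hl).symm
  | cons c t ih =>
    intro r hdd hl
    by_cases hamp : c = '&'
    · subst hamp
      rw [show pvAltGo ('&' :: t) r = pvAltGo t ('d' :: 'n' :: 'a' :: r) from by simp [pvAltGo]]
      have h1 : pvHasDD ('d' :: 'n' :: 'a' :: r) = false := by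
        rw [pvHasDD_cons_ne _ (by decide), pvHasDD_cons_ne _ (by decide),
            pvHasDD_cons_ne _ (by decide)]
        exact hdd
      have h2 : ('d' :: 'n' :: 'a' :: r).getLast? ≠ some '_' := by
        cases r with
        | nil => decide
        | cons x u => simpa [List.getLast?_cons] using hl
      rw [ih _ h1 h2]
      simp [pvG, List.flatMap_cons, List.append_assoc]
    · by_cases hsep : c = '/' ∨ c = '-' ∨ c = ' ' ∨ c = '_'
      · have hgc : pvG c = ['_'] := by
          rcases hsep with h | h | h | h <;> subst h <;> decide
        rw [show pvAltGo (c :: t) r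
            = if r ≠ [] ∧ r.head? ≠ some '_' then pvAltGo t ('_' :: r) else pvAltGo t r from by
          simp [pvAltGo, hamp, hsep]]
        by_cases hcond : r ≠ [] ∧ r.head? ≠ some '_'
        · rw [if_pos hcond]
          obtain ⟨hne, hhd⟩ := hcond
          have h1 : pvHasDD ('_' :: r) = false := by rw [pvHasDD_cons_u r hhd]; exact hdd
          have h2 : ('_' :: r).getLast? ≠ some '_' := by
            cases r with
            | nil => exact absurd rfl hne
            | cons x u => simpa [List.getLast?_cons] using hl
          rw [ih _ h1 h2]
          simp [hgc, List.flatMap_cons, List.append_assoc]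
        · rw [if_neg hcond]
          rw [ih _ hdd hl]
          simp only [List.flatMap_cons, hgc]
          rcases (not_and_or.mp hcond) with hne | hhd
          · have hr : r = [] := by simpa using hne
            subst hr
            simp only [List.reverse_nil, List.nil_append, List.cons_append]
            rw [pvTrimU_squeeze_cons_u]
          · have hhd' : r.head? = some '_' := by simpa using hhd
            cases r with
            | nil => simp at hhd'
            | cons x u =>
              simp only [List.head?_cons, Option.some.injEq] at hhd'
              subst hhd'
              simp only [List.reverse_cons, List.append_assoc, List.singleton_append,
                List.cons_append, List.nil_append]
              rw [pvSqueeze_append_uu]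
      · by_cases hdrop : c = '(' ∨ c = ')' ∨ c = ','
        · have hgc : pvG c = [] := by
            rcases hdrop with h | h | h <;> subst h <;> decide
          rw [show pvAltGo (c :: t) r = pvAltGo t r from by
            simp only [pvAltGo, hamp, hsep, hdrop]; simp [hamp, hsep, hdrop]]
          rw [ih _ hdd hl]
          simp [hgc]
        · have hcu : c ≠ '_' := by intro h; exact hsep (by simp [h])
          have hgc : pvG c = [c] := by
            unfold pvG
            rw [if_neg hamp, if_neg (by intro h; exact hsep (by tauto)), if_neg hdrop]
          rw [show pvAltGo (c :: t) r = pvAltGo t (c :: r) from by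
            simp only [pvAltGo]; simp [hamp, hsep, hdrop]]
          have h1 : pvHasDD (c :: r) = false := by rw [pvHasDD_cons_ne c hcu]; exact hdd
          have h2 : (c :: r).getLast? ≠ some '_' := by
            cases r with
            | nil => simpa using hcu
            | cons x u => simpa [List.getLast?_cons] using hl
          rw [ih _ h1 h2]
          simp [hgc, List.flatMap_cons, List.append_assoc]


theorem pvCollapse_eq_squeeze (s : List Char) : pvCollapse s = pvSqueeze s := by
  fun_induction pvCollapse s with
  | case1 s h ih =>
    rw [ih, pvStep_eq_replace, pvSqueeze_step]
  | case2 s h =>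
    have h' : pvHasDD s = false := by
      by_contra hh
      have hin : ['_', '_'] <:+: s := (pvHasDD_iff s).mpr (by simpa using hh)
      exact h (by rw [PySem.Chars.isIn_iff_infix]; exact hin)
    exact (pvSqueeze_of_noDD s h').symm


-- ===== VERDICT (by name: the statement is the Claim_ definition above) =====
theorem normalize_scope_name_spec : Claim_equal_normalize_scope_name := by
  intro name _
  unfold Spec_normalize_scope_name normalize_scope_name normalize_scope_name_alt
  by_cases h : name = ""
  · simp [h]
  · simp only [h, if_false]
    rw [pvChain_eq, pvCollapse_eq_squeeze]
    have := pvAltGo_spec (PySem.Chars.strip (PySem.Chars.lower name.toList)) []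
      (by simp [pvHasDD]) (by simp)
    simp only [List.reverse_nil, List.nil_append, pvTrimU] at this
    rw [← this]
    simp [pvDropU]
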